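-- pv_equiv track=rewrite | github.com/1Jaroslav1/PiKNIk | Round9/EX1/Board.py | check_threefold_repetition
-- ===== SOURCE A (Python) =====
-- def check_threefold_repetition(history):
--     if len(history) > 4:
--         last = ""
--         count = 0
--         for i in range(len(history)-1, -1, -4):
--             if last != history[i]:
--                 last = history[i]
--                 count = 1
--             else:
--                 count += 1
--
--             if count == 3:
--                 return True
--     return False
-- ===== SOURCE B (Python) =====
-- def check_threefold_repetition(history):
--     # A board repeats threefold exactly when some position equals the positions
--     # 4 and 8 plies earlier, aligned with the last move; the range bound 7
--     # guarantees i - 8 >= 0, and an empty range covers short histories.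
--     return any(history[i] == history[i - 4] == history[i - 8]
--                for i in range(len(history) - 1, 7, -4))
-- ===== Notes on version B (the rewrite author's own statement) =====
-- stated objective: simpler
-- what changed: Replaces the stateful backward scan with a run counter (last/count, early return) by a stateless existence test: any index i stepping -4 from the end with history[i] == history[i-4] == history[i-8]; the length guard disappears because the range is empty for short histories.
import Mathlib
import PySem

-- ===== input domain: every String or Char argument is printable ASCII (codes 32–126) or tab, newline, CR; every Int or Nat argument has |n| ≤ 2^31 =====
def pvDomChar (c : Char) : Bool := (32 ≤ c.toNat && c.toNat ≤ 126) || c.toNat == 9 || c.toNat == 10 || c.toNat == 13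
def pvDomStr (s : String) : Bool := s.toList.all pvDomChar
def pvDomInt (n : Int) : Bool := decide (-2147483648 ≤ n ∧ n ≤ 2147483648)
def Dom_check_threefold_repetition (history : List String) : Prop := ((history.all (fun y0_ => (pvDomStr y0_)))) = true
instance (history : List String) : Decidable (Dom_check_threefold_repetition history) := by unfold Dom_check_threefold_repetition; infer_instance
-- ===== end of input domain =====

-- B replaces A's stateful backward scan with a run counter (last/count, early return) by a
-- stateless existence test: any index i stepping -4 from the end of the history with
-- history[i] == history[i-4] == history[i-8] (alternative decomposition; same asymptotic cost).


-- ===== PORT A =====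
-- A's for-loop over range(len(history)-1, -1, -4) with state (last, count) and early return;
-- every index the range produces is in bounds, so `(pyGet? …).getD ""` is exact here
def pvALoop (history : List String) : List Int → String → Int → Bool
  | [], _, _ => false
  | i :: rest, last, count =>
    let cur := (PySem.List.pyGet? history i).getD ""
    let p := if last ≠ cur then (cur, (1 : Int)) else (last, count + 1)
    if p.2 = 3 then true else pvALoop history rest p.1 p.2

def check_threefold_repetition (history : List String) : Bool :=
  if 4 < (history.length : Int) then
    pvALoop history (PySem.List.pyRange ((history.length : Int) - 1) (-1) (-4)) "" 0
  else false

-- ===== PORT B =====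
-- B's generator: any(history[i] == history[i-4] == history[i-8] for i in range(n-1, 7, -4));
-- each produced i satisfies 8 ≤ i ≤ n-1, so all three accesses are in bounds and
-- `(pyGet? …).getD ""` is exact here
def check_threefold_repetition_alt (history : List String) : Bool :=
  (PySem.List.pyRange ((history.length : Int) - 1) 7 (-4)).any (fun i =>
    ((PySem.List.pyGet? history i).getD "" == (PySem.List.pyGet? history (i - 4)).getD "")
    && ((PySem.List.pyGet? history (i - 4)).getD "" == (PySem.List.pyGet? history (i - 8)).getD ""))

-- ===== PRECONDITION & SPEC =====
def Spec_check_threefold_repetition (history : List String) (out : Bool) : Prop := out = check_threefold_repetition_alt history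
instance (history : List String) (out : Bool) : Decidable (Spec_check_threefold_repetition history out) := by unfold Spec_check_threefold_repetition; infer_instance

-- ===== CLAIM (what is proved, stated in full; the proofs are below) =====
def Claim_equal_check_threefold_repetition : Prop := ∀ (history : List String), Dom_check_threefold_repetition history → Spec_check_threefold_repetition history (check_threefold_repetition history)

-- ===== LEMMAS AND PROOFS =====

-- A's loop with the indexing abstracted away: the same loop over the fetched elements
def pvAElem : List String → String → Int → Bool
  | [], _, _ => false
  | x :: r, last, count =>
    let p := if last ≠ x then (x, (1 : Int)) else (last, count + 1)
    if p.2 = 3 then true else pvAElem r p.1 p.2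

theorem pvALoop_eq_elem (history : List String) (idxs : List Int) (last : String) (count : Int) :
    pvALoop history idxs last count
      = pvAElem (idxs.map (fun i => (PySem.List.pyGet? history i).getD "")) last count := by
  induction idxs generalizing last count with
  | nil => rfl
  | cons i rest ih =>
    simp only [pvALoop, pvAElem, List.map_cons]
    split <;> split <;> first | rfl | exact ih _ _

-- three consecutive equal elements somewhere in the list
def pvHasTriple : List String → Bool
  | a :: b :: c :: t => (a == b && b == c) || pvHasTriple (b :: c :: t)
  | _ => false

-- A's run-counting loop detects exactly a triple of consecutive equal elements
theorem pvPair (seq : List String) :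
    (∀ v, pvAElem seq v 1 = pvHasTriple (v :: seq)) ∧
    (∀ v, pvAElem seq v 2 = pvHasTriple (v :: v :: seq)) := by
  induction seq with
  | nil => exact ⟨fun v => rfl, fun v => rfl⟩
  | cons x r ih =>
    constructor
    · intro v
      by_cases hv : v = x
      · subst hv
        have h1 : pvAElem (v :: r) v 1 = pvAElem r v 2 := by simp [pvAElem]
        rw [h1, ih.2 v]
      · have h1 : pvAElem (x :: r) v 1 = pvAElem r x 1 := by simp [pvAElem, hv]
        rw [h1, ih.1 x]
        have hb : (v == x) = false := beq_eq_false_iff_ne.mpr hv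
        cases r with
        | nil => simp [pvHasTriple]
        | cons c t => simp [pvHasTriple, hb]
    · intro v
      by_cases hv : v = x
      · subst hv
        simp [pvAElem, pvHasTriple]
      · have h1 : pvAElem (x :: r) v 2 = pvAElem r x 1 := by simp [pvAElem, hv]
        rw [h1, ih.1 x]
        have hb : (v == x) = false := beq_eq_false_iff_ne.mpr hv
        cases r with
        | nil => simp [pvHasTriple, hb]
        | cons c t => simp [pvHasTriple, hb]

theorem pvAElem_eq_hasTriple (seq : List String) : pvAElem seq "" 0 = pvHasTriple seq := by
  cases seq with
  | nil => rfl
  | cons x r =>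
    have h1 : pvAElem (x :: r) "" 0 = pvAElem r x 1 := by
      by_cases hx : ("" : String) = x
      · subst hx; simp [pvAElem]
      · simp [pvAElem, hx]
    rw [h1, (pvPair r).1 x]

theorem pvHasTriple_short (l : List String) (h : l.length ≤ 2) : pvHasTriple l = false := by
  match l, h with
  | [], _ => rfl
  | [a], _ => rfl
  | [a, b], _ => rfl

-- peeling lemmas for range(a, b, -4)
theorem pvRange_neg4_nil (a b : Int) (h : a ≤ b) : PySem.List.pyRange a b (-4) = [] := by
  simp only [PySem.List.pyRange]
  norm_num
  intro h'
  omega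

theorem pvRange_neg4_cons (a b : Int) (h : b < a) :
    PySem.List.pyRange a b (-4) = a :: PySem.List.pyRange (a - 4) b (-4) := by
  simp only [PySem.List.pyRange]
  norm_num
  rw [if_pos h]
  have hc : ((a - b + 4 - 1) / 4).toNat = ((a - b + 4 - 1) / 4 - 1).toNat + 1 := by omega
  rw [hc, List.range_succ_eq_map, List.map_cons, List.map_map]
  refine List.cons_eq_cons.mpr ⟨by norm_num, ?_⟩
  by_cases h4 : b < a - 4
  · rw [if_pos h4]
    have hcc : ((a - 4 - b + 4 - 1) / 4).toNat = ((a - b + 4 - 1) / 4 - 1).toNat := by omega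
    rw [hcc]
    apply List.map_congr_left
    intro k _
    simp only [Function.comp_apply]
    push_cast
    ring
  · rw [if_neg h4]
    have hcc : ((a - b + 4 - 1) / 4 - 1).toNat = 0 := by omega
    rw [hcc]
    rfl

theorem pvRange_neg4_len (a b : Int) :
    ((PySem.List.pyRange a b (-4)).length : Int) = if b < a then (a - b + 3) / 4 else 0 := by
  simp only [PySem.List.pyRange]
  norm_num
  split
  · omega
  · rfl

-- the main bridge: A's triple-run detection over the fetched strided sequence equals
-- B's existence test, proved by peeling four indices at a time from both ranges
theorem pvPeel (f : Int → String) (n : Nat) :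
    ∀ s : Int, s.toNat ≤ n →
      pvHasTriple ((PySem.List.pyRange s (-1) (-4)).map f)
        = (PySem.List.pyRange s 7 (-4)).any
            (fun i => (f i == f (i - 4)) && (f (i - 4) == f (i - 8))) := by
  induction n with
  | zero =>
    intro s hs
    have hs8 : s ≤ 7 := by omega
    rw [pvRange_neg4_nil s 7 hs8, List.any_nil]
    apply pvHasTriple_short
    rw [List.length_map]
    have := pvRange_neg4_len s (-1)
    omega
  | succ n ih =>
    intro s hs
    by_cases h8 : 7 < s
    · rw [pvRange_neg4_cons s 7 h8, pvRange_neg4_cons s (-1) (by omega),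
        pvRange_neg4_cons (s - 4) (-1) (by omega), pvRange_neg4_cons (s - 4 - 4) (-1) (by omega)]
      simp only [List.map_cons, List.any_cons]
      have hsub : s - 4 - 4 = s - 8 := by ring
      rw [hsub]
      have htail : pvHasTriple (f s :: f (s - 4) :: f (s - 8) :: (PySem.List.pyRange (s - 8 - 4) (-1) (-4)).map f)
          = (((f s == f (s - 4)) && (f (s - 4) == f (s - 8)))
            || pvHasTriple (f (s - 4) :: f (s - 8) :: (PySem.List.pyRange (s - 8 - 4) (-1) (-4)).map f)) := rfl
      rw [htail]
      have hfold : f (s - 4) :: f (s - 8) :: (PySem.List.pyRange (s - 8 - 4) (-1) (-4)).map f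
          = (PySem.List.pyRange (s - 4) (-1) (-4)).map f := by
        rw [pvRange_neg4_cons (s - 4) (-1) (by omega), pvRange_neg4_cons (s - 4 - 4) (-1) (by omega)]
        simp only [List.map_cons]
        rw [hsub]
      rw [hfold, ih (s - 4) (by omega)]
    · rw [pvRange_neg4_nil s 7 (by omega), List.any_nil]
      apply pvHasTriple_short
      rw [List.length_map]
      have := pvRange_neg4_len s (-1)
      omega

-- ===== VERDICT (by name: the statement is the Claim_ definition above) =====
theorem check_threefold_repetition_spec : Claim_equal_check_threefold_repetition := by
  intro history _
  unfold Spec_check_threefold_repetition check_threefold_repetition check_threefold_repetition_alt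
  by_cases h : 4 < (history.length : Int)
  · rw [if_pos h, pvALoop_eq_elem, pvAElem_eq_hasTriple]
    exact pvPeel (fun i => (PySem.List.pyGet? history i).getD "")
      ((history.length : Int) - 1).toNat ((history.length : Int) - 1) le_rfl
  · rw [if_neg h, pvRange_neg4_nil _ 7 (by omega), List.any_nil]
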